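-- pv_equiv track=rewrite | github.com/wbelote/kattis | attempts/buildingboundaries.py | plot_sort
-- ===== SOURCE A (Python) =====
-- def plot_sort(plot):
--     for i in (0, 2, 4):
--         if plot[i] < plot[i + 1]:
--             plot[i], plot[i + 1] = plot[i + 1], plot[i]
--
--     if plot[0:2] < plot[2:4]:
--         plot[0:4] = plot[2:4] + plot[0:2]
--     if plot[2:4] < plot[4:6]:
--         plot[2:6] = plot[4:6] + plot[2:4]
--     if plot[0:2] < plot[2:4]:
--         plot[0:4] = plot[2:4] + plot[0:2]
--     return plot
-- ===== SOURCE B (Python) =====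
-- def plot_sort(plot):
--     pairs = sorted(((max(plot[i], plot[i + 1]), min(plot[i], plot[i + 1]))
--                     for i in (0, 2, 4)), reverse=True)
--     plot[0:6] = [x for pr in pairs for x in pr]
--     return plot
-- ===== Notes on version B (the rewrite author's own statement) =====
-- stated objective: idiomatic
-- what changed: A's hand-written three-comparison sorting network over the fixed six slots is replaced by forming the three coordinate pairs as (max, min) tuples and sorting them with the built-in sorted(..., reverse=True), then writing the flattened result back into plot[0:6].
import Mathlib
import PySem

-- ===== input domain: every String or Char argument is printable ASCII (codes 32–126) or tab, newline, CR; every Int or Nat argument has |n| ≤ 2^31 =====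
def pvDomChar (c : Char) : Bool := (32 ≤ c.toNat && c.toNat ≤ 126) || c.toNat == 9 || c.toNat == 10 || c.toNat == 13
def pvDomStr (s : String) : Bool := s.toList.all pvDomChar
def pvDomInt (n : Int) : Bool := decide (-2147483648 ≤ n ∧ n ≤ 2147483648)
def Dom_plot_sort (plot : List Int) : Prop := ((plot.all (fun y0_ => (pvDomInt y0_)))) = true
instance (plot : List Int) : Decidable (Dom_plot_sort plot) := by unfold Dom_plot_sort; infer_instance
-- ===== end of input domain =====

-- B replaces A's hand-written compare-and-swap sorting network by the idiomatic
-- sorted(..., reverse=True) over (max, min) pairs; both Pythons mutate plot[0:6] in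
-- place (the equivalence proved here is about the returned value).

-- ===== PORT A =====
-- Python's `<` on two-element int lists (the slices plot[0:2] etc.), lexicographic.
def pyLt2 (x y u v : Int) : Bool := decide (x < u) || (decide (x = u) && decide (y < v))

-- the three slice-swap statements of A's body, acting on the slices plot[0:2], plot[2:4], plot[4:6]
def netStep (p q r : Int × Int) : (Int × Int) × (Int × Int) × (Int × Int) :=
  -- if plot[0:2] < plot[2:4]: plot[0:4] = plot[2:4] + plot[0:2]
  let pq := if pyLt2 p.1 p.2 q.1 q.2 then (q, p) else (p, q)
  -- if plot[2:4] < plot[4:6]: plot[2:6] = plot[4:6] + plot[2:4]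
  let qr := if pyLt2 pq.2.1 pq.2.2 r.1 r.2 then (r, pq.2) else (pq.2, r)
  -- if plot[0:2] < plot[2:4]: plot[0:4] = plot[2:4] + plot[0:2]
  let pq' := if pyLt2 pq.1.1 pq.1.2 qr.1.1 qr.1.2 then (qr.1, pq.1) else (pq.1, qr.1)
  (pq'.1, pq'.2, qr.2)

def plot_sort (plot : List Int) : List Int :=
  match plot with
  | a :: b :: c :: d :: e :: f :: rest =>
    -- for i in (0, 2, 4): conditional in-place swap of plot[i], plot[i+1]
    let s1 := if a < b then (b, a) else (a, b)
    let s2 := if c < d then (d, c) else (c, d)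
    let s3 := if e < f then (f, e) else (e, f)
    let t := netStep s1 s2 s3
    t.1.1 :: t.1.2 :: t.2.1.1 :: t.2.1.2 :: t.2.2.1 :: t.2.2.2 :: rest
  | _ => plot   -- len(plot) < 6: Python raises IndexError (outside Pre_); totality guard

-- ===== PORT B =====
def plot_sort_alt (plot : List Int) : List Int :=
  if 6 ≤ plot.length then
    let pairs := PySem.List.sorted2
      [(max (plot.getD 0 0) (plot.getD 1 0), min (plot.getD 0 0) (plot.getD 1 0)),
       (max (plot.getD 2 0) (plot.getD 3 0), min (plot.getD 2 0) (plot.getD 3 0)),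
       (max (plot.getD 4 0) (plot.getD 5 0), min (plot.getD 4 0) (plot.getD 5 0))]
      (fun p => p.1) (fun p => p.2) true
    -- plot[0:6] = flattened pairs; elements past index 5 (plot[6:]) are untouched
    (pairs.flatMap (fun p => [p.1, p.2])) ++ plot.drop 6
  else plot   -- len(plot) < 6: Python raises IndexError (outside Pre_); totality guard

-- ===== PRECONDITION & SPEC =====
-- A unconditionally reads the first six elements, so any shorter list raises IndexError.
def Pre_plot_sort (plot : List Int) : Prop := 6 ≤ plot.length
instance (plot : List Int) : Decidable (Pre_plot_sort plot) := by unfold Pre_plot_sort; infer_instance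
def pvWitness_plot_sort : List Int := [1, 2, 5, 0, 3, 3, 9]

def Spec_plot_sort (plot : List Int) (out : List Int) : Prop := out = plot_sort_alt plot
instance (plot : List Int) (out : List Int) : Decidable (Spec_plot_sort plot out) := by unfold Spec_plot_sort; infer_instance

-- ===== CLAIM (what is proved, stated in full; the proofs are below) =====
def Claim_equal_plot_sort : Prop := ∀ (plot : List Int), Dom_plot_sort plot → Pre_plot_sort plot → Spec_plot_sort plot (plot_sort plot)

-- ===== LEMMAS AND PROOFS =====
lemma swap_eq_max_min (x y : Int) :
    (if x < y then (y, x) else (x, y)) = (max x y, min x y) := by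
  split_ifs with h <;> simp only [Prod.mk.injEq, max_def, min_def] <;> split_ifs <;> omega

-- descending-lex insertion sort of three pairs computes exactly A's sorting network
set_option maxHeartbeats 2000000 in
lemma sorted2_eq_netStep (p1 p2 q1 q2 r1 r2 : Int) :
    PySem.List.sorted2 [(p1, p2), (q1, q2), (r1, r2)]
        (fun p => p.1) (fun p => p.2) true
      = [(netStep (p1, p2) (q1, q2) (r1, r2)).1,
         (netStep (p1, p2) (q1, q2) (r1, r2)).2.1,
         (netStep (p1, p2) (q1, q2) (r1, r2)).2.2] := by
  simp only [netStep, pyLt2, PySem.List.sorted2, PySem.List.insertBy, List.foldl]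
  split_ifs <;>
    simp only [PySem.List.insertBy] <;>
    split_ifs <;>
    simp only [List.cons.injEq, Prod.mk.injEq, and_true] <;>
    first
      | rfl
      | (simp only [Bool.or_eq_true, Bool.and_eq_true, Bool.not_eq_true',
           decide_eq_true_eq, decide_eq_false_iff_not, not_or, not_and, not_lt] at *
         omega)

lemma ports_agree_long (a b c d e f : Int) (rest : List Int) :
    plot_sort (a :: b :: c :: d :: e :: f :: rest)
      = plot_sort_alt (a :: b :: c :: d :: e :: f :: rest) := by
  simp only [plot_sort, plot_sort_alt, List.length_cons, List.getD, List.getElem?_cons_zero,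
    List.getElem?_cons_succ, Option.getD_some, List.drop_succ_cons, List.drop_zero,
    if_pos (by omega : 6 ≤ rest.length + 1 + 1 + 1 + 1 + 1 + 1)]
  rw [swap_eq_max_min a b, swap_eq_max_min c d, swap_eq_max_min e f, sorted2_eq_netStep]
  simp [List.flatMap]

-- ===== VERDICT (by name: the statement is the Claim_ definition above) =====
theorem plot_sort_spec : Claim_equal_plot_sort := by
  intro plot _ hpre
  match plot, hpre with
  | a :: b :: c :: d :: e :: f :: rest, _ =>
    exact ports_agree_long a b c d e f rest
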